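-- pv_equiv track=rewrite | github.com/Dhruvin131/EventCheker | main.py | isLimitExceed
-- ===== SOURCE A (Python) =====
-- from collections import deque
--
-- def isLimitExceed(lsEvents: list[int]) -> bool:
--     """
--     Function to check if the number of events exceeds the limit of 100 within 60 seconds.
--
--     Args:
--     lsEvents (list): List of events.
--
--     Returns:
--     bool: True if the number of events exceeds 100 within 60 seconds, False otherwise.
--     """
--     try:
--         lsEvents = sorted([int(i) for i in lsEvents])
--     except Exception as e:
--         raise ValueError(f"An error occurred: {e}")
--
--     window = deque()
--     for j in lsEvents:
--         window.append(j)
--         while window and j-window[0] > 60: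
--             window.popleft()
--         if len(window) > 100:
--             return True
--
--     return False
-- ===== SOURCE B (Python) =====
-- def isLimitExceed(lsEvents: list[int]) -> bool:
--     try:
--         events = sorted([int(i) for i in lsEvents])
--     except Exception as e:
--         raise ValueError(f"An error occurred: {e}")
--     return any(events[i] - events[i - 100] <= 60 for i in range(100, len(events)))
-- ===== Notes on version B (the rewrite author's own statement) =====
-- stated objective: simpler
-- what changed: The maintained sliding-window deque (append, popleft-while, length test) is dropped entirely: since >100 events within 60 seconds means 101 consecutive sorted events span at most 60, B just scans the sorted list once comparing events[i] with events[i-100] at a fixed stride of 100.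
import Mathlib
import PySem

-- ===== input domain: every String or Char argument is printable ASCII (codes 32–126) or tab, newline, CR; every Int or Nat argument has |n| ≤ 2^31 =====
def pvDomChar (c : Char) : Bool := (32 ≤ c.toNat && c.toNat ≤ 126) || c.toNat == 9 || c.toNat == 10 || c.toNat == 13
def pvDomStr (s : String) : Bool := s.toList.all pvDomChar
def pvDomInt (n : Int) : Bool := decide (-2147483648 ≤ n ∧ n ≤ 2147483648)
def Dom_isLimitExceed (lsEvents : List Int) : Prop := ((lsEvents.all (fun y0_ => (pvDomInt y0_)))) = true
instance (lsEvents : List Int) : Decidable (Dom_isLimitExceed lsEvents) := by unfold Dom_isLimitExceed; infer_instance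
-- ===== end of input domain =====

-- B replaces A's maintained sliding-window deque by a single fixed-stride scan of the
-- sorted list (events[i] vs events[i-100]); objective: simpler. A is total on List Int
-- (int(i) on an int never raises, so the except branch is unreachable): no Pre_.

-- ===== PORT A =====
-- the while-loop 'while window and j - window[0] > 60: window.popleft()' pops front
-- elements exactly while the front satisfies the test: this is List.dropWhile (exact).
def pvLoopA (rest window : List Int) : Bool :=
  match rest with
  | [] => false
  | j :: rest' =>
    let w2 := (window ++ [j]).dropWhile (fun x => decide (60 < j - x))
    if 100 < w2.length then true else pvLoopA rest' w2

def isLimitExceed (lsEvents : List Int) : Bool :=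
  pvLoopA (PySem.List.sorted (lsEvents.map (fun i => i)) (fun x => x) false) []

-- ===== PORT B =====
def isLimitExceed_alt (lsEvents : List Int) : Bool :=
  let events := PySem.List.sorted (lsEvents.map (fun i => i)) (fun x => x) false
  (PySem.List.pyRange 100 (events.length : Int) 1).any (fun i =>
    decide (PySem.List.pyGetD events i 0 - PySem.List.pyGetD events (i - 100) 0 ≤ 60))

-- ===== PRECONDITION & SPEC =====
def Spec_isLimitExceed (lsEvents : List Int) (out : Bool) : Prop := out = isLimitExceed_alt lsEvents
instance (lsEvents : List Int) (out : Bool) : Decidable (Spec_isLimitExceed lsEvents out) := by unfold Spec_isLimitExceed; infer_instance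

-- ===== CLAIM (what is proved, stated in full; the proofs are below) =====
def Claim_equal_isLimitExceed : Prop := ∀ (lsEvents : List Int), Dom_isLimitExceed lsEvents → Spec_isLimitExceed lsEvents (isLimitExceed lsEvents)

-- ===== LEMMAS AND PROOFS =====

-- takeWhile/dropWhile are take/drop at the takeWhile length
theorem pv_takeWhile_eq_take (p : Int → Bool) (l : List Int) :
    l.takeWhile p = l.take (l.takeWhile p).length := by
  have h := List.takeWhile_append_dropWhile (p := p) (l := l)
  calc l.takeWhile p
      = ((l.takeWhile p ++ l.dropWhile p).take (l.takeWhile p).length) :=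
        (List.take_left' rfl).symm
    _ = l.take (l.takeWhile p).length := by rw [h]

theorem pv_dropWhile_eq_drop (p : Int → Bool) (l : List Int) :
    l.dropWhile p = l.drop (l.takeWhile p).length := by
  have h := List.takeWhile_append_dropWhile (p := p) (l := l)
  calc l.dropWhile p
      = ((l.takeWhile p ++ l.dropWhile p).drop (l.takeWhile p).length) :=
        (List.drop_left' rfl).symm
    _ = l.drop (l.takeWhile p).length := by rw [h]

-- the key invariant characterising A's loop: with the already-kept window w in front,
-- the loop fires exactly when some still-to-come event is ≤ 60 above the event 100
-- positions earlier in w ++ rest.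
theorem pvLoopA_iff (rest : List Int) : ∀ (w : List Int),
    (w ++ rest).Pairwise (· ≤ ·) → w.length ≤ 100 →
    (pvLoopA rest w = true ↔ ∃ i : Nat, i < rest.length ∧ 100 ≤ w.length + i ∧
      (w ++ rest).getD (w.length + i) 0 - (w ++ rest).getD (w.length + i - 100) 0 ≤ 60) := by
  induction rest with
  | nil =>
    intro w _ _
    simp [pvLoopA]
  | cons j rest' ih =>
    intro w hsorted hw
    set p : Int → Bool := fun x => decide (60 < j - x) with hp
    set c : List Int := w ++ j :: rest' with hc
    set d : Nat := ((w ++ [j]).takeWhile p).length with hd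
    set w2 : List Int := (w ++ [j]).dropWhile p with hw2
    -- j itself is never dropped
    have hdle : d ≤ w.length := by
      by_contra hlt
      push_neg at hlt
      have hlen : ((w ++ [j]).takeWhile p).length ≤ (w ++ [j]).length :=
        (List.takeWhile_sublist _).length_le
      simp at hlen
      have hdeq : d = w.length + 1 := by omega
      -- then takeWhile = whole list, so j ∈ takeWhile, but p j = false
      have htk : (w ++ [j]).takeWhile p = w ++ [j] := by
        rw [pv_takeWhile_eq_take p (w ++ [j]), ← hd, hdeq]
        simp
      have hj : p j = true := List.mem_takeWhile_imp (by rw [htk]; simp)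
      simp [hp] at hj
    have hw2eq : w2 = (w ++ [j]).drop d := by
      rw [hw2, pv_dropWhile_eq_drop, hd]
    have hw2len : w2.length = w.length + 1 - d := by
      rw [hw2eq]; simp
    -- the tail state as a suffix of c
    have hsuffix : w2 ++ rest' = c.drop d := by
      rw [hw2eq, hc]
      have h1' : w ++ j :: rest' = (w ++ [j]) ++ rest' := by simp
      rw [h1', List.drop_append_of_le_length (l₂ := rest') (by simp; omega)]
    have hclen : c.length = w.length + 1 + rest'.length := by simp [hc]; omega
    -- every dropped element x satisfies 60 < j - x, and it sits at position < d ≤ w.length in c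
    have hdropped : ∀ k : Nat, k < d → 60 < j - c.getD k 0 := by
      intro k hk
      have hkw : k < w.length := lt_of_lt_of_le hk hdle
      have htake : (w ++ [j]).takeWhile p = (w ++ [j]).take d := by
        rw [pv_takeWhile_eq_take p (w ++ [j]), ← hd]
      have hmem : c.getD k 0 ∈ (w ++ [j]).takeWhile p := by
        rw [htake]
        have h1 : c.getD k 0 = w[k] := by
          rw [hc, List.getD_eq_getElem _ 0 (by simp; omega)]
          simp [List.getElem_append_left hkw]
        have h2 : ((w ++ [j]).take d)[k]'(by simp; omega) = w[k] := by
          simp [List.getElem_take, List.getElem_append_left hkw]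
        rw [h1, ← h2]
        exact List.getElem_mem _
      have := List.mem_takeWhile_imp hmem
      simpa [hp] using this
    -- sortedness as an index fact
    have hmono : ∀ a b : Nat, a ≤ b → b < c.length → c.getD a 0 ≤ c.getD b 0 := by
      intro a b hab hb
      rcases eq_or_lt_of_le hab with rfl | hab'
      · exact le_refl _
      · rw [List.getD_eq_getElem _ 0 (by omega), List.getD_eq_getElem _ 0 hb]
        exact List.pairwise_iff_getElem.mp hsorted a b (by omega) hb hab'
    have hcj : c.getD w.length 0 = j := by
      rw [hc, List.getD_eq_getElem _ 0 (by simp)]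
      simp
    -- the head-of-window characterisation of the immediate branch
    have hbranch : 100 < w2.length ↔
        (100 ≤ w.length ∧ c.getD w.length 0 - c.getD 0 0 ≤ 60) := by
      constructor
      · intro h
        have hd0 : d = 0 := by omega
        have hwlen : w.length = 100 := by omega
        refine ⟨by omega, ?_⟩
        -- nothing dropped: the first element already fails the test
        rcases w with _ | ⟨h0, wtl⟩
        · simp at hwlen
        · have hph0 : p h0 = false := by
            cases hval : p h0
            · rfl
            · exfalso
              have : 1 ≤ d := by
                rw [hd]
                simp [hval]
              omega
          simp [hp] at hph0
          have hc0 : c.getD 0 0 = h0 := by simp [hc]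
          rw [hcj, hc0]
          omega
      · rintro ⟨h100, hle⟩
        have hwlen : w.length = 100 := by omega
        rcases w with _ | ⟨h0, wtl⟩
        · simp at hwlen
        · have hc0 : c.getD 0 0 = h0 := by simp [hc]
          rw [hcj, hc0] at hle
          have hph0 : p h0 = false := by simp [hp]; omega
          have hd0 : d = 0 := by
            rw [hd]; simp [hph0]
          omega
    -- now unfold one step of the loop, then forget the definitional values
    show (if 100 < w2.length then true else pvLoopA rest' w2) = true ↔ _
    clear_value w2 d c p
    have hrl : (j :: rest').length = rest'.length + 1 := by simp
    by_cases hb : 100 < w2.length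
    · simp only [hb, if_true]
      refine ⟨fun _ => ?_, fun _ => by trivial⟩
      obtain ⟨h100, hle⟩ := hbranch.mp hb
      have hw100 : w.length = 100 := by omega
      refine ⟨0, by omega, by omega, ?_⟩
      simpa [hw100] using hle
    · simp only [hb, if_false]
      have hw2le : w2.length ≤ 100 := by omega
      have hsorted' : (w2 ++ rest').Pairwise (· ≤ ·) := by
        rw [hsuffix]
        exact hsorted.sublist (List.drop_sublist d c)
      rw [ih w2 hsorted' hw2le]
      have hgetD : ∀ k : Nat, (w2 ++ rest').getD k 0 = c.getD (d + k) 0 := by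
        intro k
        rw [hsuffix]
        simp [List.getD, List.getElem?_drop]
      constructor
      · rintro ⟨i', hi', h100, hle⟩
        rw [hgetD, hgetD] at hle
        have hidx1 : d + (w2.length + i') = w.length + (i' + 1) := by omega
        have hidx2 : d + (w2.length + i' - 100) = w.length + (i' + 1) - 100 := by omega
        rw [hidx1, hidx2] at hle
        exact ⟨i' + 1, by omega, by omega, hle⟩
      · rintro ⟨i, hi, h100, hle⟩
        -- i = 0 would contradict the branch being false
        rcases Nat.eq_zero_or_pos i with rfl | hipos
        · exfalso
          have hw100 : w.length = 100 := by omega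
          exact hb (hbranch.mpr ⟨by omega, by simpa [hw100] using hle⟩)
        obtain ⟨i', rfl⟩ : ∃ i', i = i' + 1 := ⟨i - 1, by omega⟩
        have hnodrop : 100 ≤ w2.length + i' := by
          -- the event 100 back is not among the dropped ones
          by_contra hlt
          push_neg at hlt
          have hdrop : w.length + (i' + 1) - 100 < d := by omega
          have h1 := hdropped _ hdrop
          have h2 : j ≤ c.getD (w.length + (i' + 1)) 0 := by
            rw [← hcj]
            exact hmono _ _ (by omega) (by omega)
          omega
        refine ⟨i', by omega, hnodrop, ?_⟩
        rw [hgetD, hgetD]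
        have hidx1 : d + (w2.length + i') = w.length + (i' + 1) := by omega
        have hidx2 : d + (w2.length + i' - 100) = w.length + (i' + 1) - 100 := by omega
        rw [hidx1, hidx2]
        exact hle

-- B's any-over-range as the same existential
theorem pvAny_iff (s : List Int) :
    ((PySem.List.pyRange 100 (s.length : Int) 1).any (fun i =>
      decide (PySem.List.pyGetD s i 0 - PySem.List.pyGetD s (i - 100) 0 ≤ 60)) = true) ↔
    (∃ n : Nat, n < s.length ∧ 100 ≤ n ∧ s.getD n 0 - s.getD (n - 100) 0 ≤ 60) := by
  rw [List.any_eq_true]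
  constructor
  · rintro ⟨i, hmem, hcond⟩
    rw [PySem.List.mem_pyRange_one] at hmem
    have h1 : PySem.List.pyGetD s i 0 = s[i.toNat] :=
      PySem.List.pyGetD_eq_getElem _ _ (by omega) (by omega)
    have h2 : PySem.List.pyGetD s (i - 100) 0 = s[(i - 100).toNat] :=
      PySem.List.pyGetD_eq_getElem _ _ (by omega) (by omega)
    rw [h1, h2] at hcond
    simp only [decide_eq_true_eq] at hcond
    refine ⟨i.toNat, by omega, by omega, ?_⟩
    rw [List.getD_eq_getElem _ 0 (by omega), List.getD_eq_getElem _ 0 (by omega)]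
    have he : (i - 100).toNat = i.toNat - 100 := by omega
    simpa [he] using hcond
  · rintro ⟨n, hn, h100, hle⟩
    refine ⟨(n : Int), ?_, ?_⟩
    · rw [PySem.List.mem_pyRange_one]
      constructor <;> [exact_mod_cast h100; exact_mod_cast hn]
    · have h1 : PySem.List.pyGetD s (n : Int) 0 = s[((n : Int)).toNat] :=
        PySem.List.pyGetD_eq_getElem _ _ (by omega) (by omega)
      have h2 : PySem.List.pyGetD s ((n : Int) - 100) 0 = s[((n : Int) - 100).toNat] :=
        PySem.List.pyGetD_eq_getElem _ _ (by omega) (by omega)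
      rw [h1, h2]
      simp only [decide_eq_true_eq]
      rw [List.getD_eq_getElem _ 0 hn, List.getD_eq_getElem _ 0 (by omega)] at hle
      have e1 : ((n : Int)).toNat = n := by omega
      have e2 : ((n : Int) - 100).toNat = n - 100 := by omega
      simpa [e1, e2] using hle

-- ===== VERDICT (by name: the statement is the Claim_ definition above) =====
theorem isLimitExceed_spec : Claim_equal_isLimitExceed := by
  intro ls _
  show isLimitExceed ls = isLimitExceed_alt ls
  set s : List Int := PySem.List.sorted (ls.map (fun i => i)) (fun x => x) false with hs
  have hsorted : s.Pairwise (· ≤ ·) := by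
    rw [hs]
    exact PySem.List.sorted_pairwise _ _
  have hA := pvLoopA_iff s [] (by simpa using hsorted) (by simp)
  simp only [List.nil_append, List.length_nil, Nat.zero_add] at hA
  have hB : isLimitExceed_alt ls =
      ((PySem.List.pyRange 100 (s.length : Int) 1).any (fun i =>
        decide (PySem.List.pyGetD s i 0 - PySem.List.pyGetD s (i - 100) 0 ≤ 60))) := rfl
  rw [Bool.eq_iff_iff, show isLimitExceed ls = pvLoopA s [] from rfl, hA, hB, pvAny_iff]
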